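-- pv_equiv track=rewrite | github.com/abc19899/structure_reader | structure_reader/structure_reader.py | is_absolute_simply_route
-- ===== SOURCE A (Python) =====
-- def is_absolute_simply_route(route):
--     if not route:
--         return True
--
--     route_list = route.split('.')
--     for i in route_list:
--         if not i:
--             return False
--
--     return True
-- ===== SOURCE B (Python) =====
-- def is_absolute_simply_route(route):
--     if not route:
--         return True
--     return (not route.startswith('.')
--             and not route.endswith('.')
--             and '..' not in route)
-- ===== Notes on version B (the rewrite author's own statement) =====
-- stated objective: simpler
-- what changed: B drops the split-into-segments-and-loop of A and instead returns the conjunction of three direct tests: no leading dot, no trailing dot, and no two consecutive dots in the route.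
import Mathlib
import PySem

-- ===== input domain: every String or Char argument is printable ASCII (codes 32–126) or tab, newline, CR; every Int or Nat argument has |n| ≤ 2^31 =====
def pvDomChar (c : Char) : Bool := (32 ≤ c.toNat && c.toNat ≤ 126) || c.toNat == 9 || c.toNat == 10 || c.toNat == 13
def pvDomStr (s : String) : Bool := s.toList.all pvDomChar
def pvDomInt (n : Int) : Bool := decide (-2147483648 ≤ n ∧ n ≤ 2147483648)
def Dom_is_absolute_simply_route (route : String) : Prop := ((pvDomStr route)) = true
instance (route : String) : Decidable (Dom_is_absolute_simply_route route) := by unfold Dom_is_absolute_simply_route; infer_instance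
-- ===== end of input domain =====

-- B replaces A's split-then-scan by three boundary/substring tests (no segment list is built); objective: simpler.


-- ===== PORT A =====
-- the 'for i in route_list: if not i: return False' loop, as structural recursion
def pvCheckSegs : List (List Char) → Bool
  | [] => true
  | i :: rest => if i = [] then false else pvCheckSegs rest

def is_absolute_simply_route (route : String) : Bool :=
  if route = "" then true
  else pvCheckSegs (PySem.Chars.splitOn route.toList ['.'])

-- ===== PORT B =====
def is_absolute_simply_route_alt (route : String) : Bool :=
  if route = "" then true
  else !(PySem.Str.startswith route ".") && !(PySem.Str.endswith route ".") &&
       !(PySem.Str.isIn ".." route)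

-- ===== PRECONDITION & SPEC =====
def Spec_is_absolute_simply_route (route : String) (out : Bool) : Prop := out = is_absolute_simply_route_alt route
instance (route : String) (out : Bool) : Decidable (Spec_is_absolute_simply_route route out) := by unfold Spec_is_absolute_simply_route; infer_instance

-- ===== CLAIM (what is proved, stated in full; the proofs are below) =====
def Claim_equal_is_absolute_simply_route : Prop := ∀ (route : String), Dom_is_absolute_simply_route route → Spec_is_absolute_simply_route route (is_absolute_simply_route route)

-- ===== LEMMAS AND PROOFS =====

-- an accumulator-form description of splitOn.go for the single-char separator '.'
def pvSimpleSplit : List Char → List Char → List (List Char)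
  | [], cur => [cur.reverse]
  | c :: rest, cur => if c = '.' then cur.reverse :: pvSimpleSplit rest [] else pvSimpleSplit rest (c :: cur)

theorem pvGo_eq (fuel : Nat) : ∀ (l cur : List Char) (acc : List (List Char)), l.length < fuel →
    PySem.Chars.splitOn.go ['.'] fuel l cur acc = acc.reverse ++ pvSimpleSplit l cur := by
  induction fuel with
  | zero => intro l cur acc h; omega
  | succ n ih =>
    intro l cur acc h
    cases l with
    | nil => simp [PySem.Chars.splitOn.go, pvSimpleSplit]
    | cons c rest =>
      by_cases hc : c = '.'
      · subst hc
        rw [show PySem.Chars.splitOn.go ['.'] (n+1) ('.' :: rest) cur acc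
              = PySem.Chars.splitOn.go ['.'] n rest [] (cur.reverse :: acc) by
            simp [PySem.Chars.splitOn.go, List.isPrefixOf]]
        rw [ih rest [] (cur.reverse :: acc) (by simp at h; omega)]
        simp [pvSimpleSplit]
      · rw [show PySem.Chars.splitOn.go ['.'] (n+1) (c :: rest) cur acc
              = PySem.Chars.splitOn.go ['.'] n rest (c :: cur) acc by
            simp [PySem.Chars.splitOn.go, List.isPrefixOf, Ne.symm hc]]
        rw [ih rest (c :: cur) acc (by simp at h; omega)]
        simp [pvSimpleSplit, hc]

theorem pvSplitOn_eq (s : List Char) : PySem.Chars.splitOn s ['.'] = pvSimpleSplit s [] := by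
  rw [show PySem.Chars.splitOn s ['.'] = PySem.Chars.splitOn.go ['.'] (s.length + 1) s [] [] from rfl,
      pvGo_eq (s.length + 1) s [] [] (by omega)]
  simp

-- the invariant of A's scan: all produced segments nonempty ↔ boundary/substring conditions
theorem pvKey : ∀ (s cur : List Char),
    pvCheckSegs (pvSimpleSplit s cur) = true ↔
      ((cur ≠ [] ∨ ∃ c rest, s = c :: rest ∧ c ≠ '.') ∧ ¬ ['.'] <:+ s ∧ ¬ ['.', '.'] <:+: s) := by
  intro s
  induction s with
  | nil =>
    intro cur
    by_cases hcur : cur = []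
    · subst hcur
      constructor
      · intro h; simp [pvSimpleSplit, pvCheckSegs] at h
      · rintro ⟨h1, -, -⟩
        rcases h1 with h1 | ⟨d, r, hdr, -⟩
        · exact absurd rfl h1
        · simp at hdr
    · constructor
      · intro _
        refine ⟨Or.inl hcur, ?_, ?_⟩
        · intro hs; simp at hs
        · intro hi; simp at hi
      · intro _
        simp [pvSimpleSplit, pvCheckSegs, hcur]
  | cons c rest ih =>
    intro cur
    by_cases hc : c = '.'
    · subst hc
      rw [show pvSimpleSplit ('.' :: rest) cur = cur.reverse :: pvSimpleSplit rest [] by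
            simp [pvSimpleSplit]]
      by_cases hcur : cur = []
      · subst hcur
        constructor
        · intro h; simp [pvCheckSegs] at h
        · rintro ⟨h1, -, -⟩
          rcases h1 with h1 | ⟨d, r, hdr, hd⟩
          · exact absurd rfl h1
          · exact absurd ((List.cons_eq_cons.mp hdr).1.symm) hd
      · have hcr' : cur.reverse ≠ [] := by simp [hcur]
        rw [show pvCheckSegs (cur.reverse :: pvSimpleSplit rest []) = pvCheckSegs (pvSimpleSplit rest []) by
              simp [pvCheckSegs, hcr']]
        rw [ih []]
        constructor
        · rintro ⟨h1, h2, h3⟩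
          rcases h1 with h1 | ⟨d, r, hdr, hd⟩
          · exact absurd rfl h1
          · refine ⟨Or.inl hcur, ?_, ?_⟩
            · intro hsuf
              rcases List.suffix_cons_iff.mp hsuf with h | h
              · have hrest : [] = rest := (List.cons_eq_cons.mp h).2
                rw [← hrest] at hdr; simp at hdr
              · exact h2 h
            · intro hinf
              rcases List.infix_cons_iff.mp hinf with h | h
              · have h' := (List.cons_prefix_cons.mp h).2
                rw [hdr] at h'
                exact hd ((List.cons_prefix_cons.mp h').1.symm)
              · exact h3 h
        · rintro ⟨-, h2, h3⟩
          have hrne : rest ≠ [] := by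
            intro h; subst h; exact h2 (List.suffix_refl _)
          rcases List.exists_cons_of_ne_nil hrne with ⟨d, r, hdr⟩
          subst hdr
          have hd : d ≠ '.' := by
            intro h; subst h
            exact h3 (List.infix_cons_iff.mpr (Or.inl
              (List.cons_prefix_cons.mpr ⟨rfl, List.cons_prefix_cons.mpr ⟨rfl, List.nil_prefix⟩⟩)))
          refine ⟨Or.inr ⟨d, r, rfl, hd⟩, ?_, ?_⟩
          · intro h; exact h2 (List.suffix_cons_iff.mpr (Or.inr h))
          · intro h; exact h3 (List.infix_cons_iff.mpr (Or.inr h))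
    · rw [show pvSimpleSplit (c :: rest) cur = pvSimpleSplit rest (c :: cur) by
            simp [pvSimpleSplit, hc]]
      rw [ih (c :: cur)]
      constructor
      · rintro ⟨-, h2, h3⟩
        refine ⟨Or.inr ⟨c, rest, rfl, hc⟩, ?_, ?_⟩
        · intro hsuf
          rcases List.suffix_cons_iff.mp hsuf with h | h
          · exact hc ((List.cons_eq_cons.mp h).1.symm)
          · exact h2 h
        · intro hinf
          rcases List.infix_cons_iff.mp hinf with h | h
          · exact hc ((List.cons_prefix_cons.mp h).1.symm)
          · exact h3 h
      · rintro ⟨-, h2, h3⟩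
        refine ⟨Or.inl (by simp), ?_, ?_⟩
        · intro h; exact h2 (List.suffix_cons_iff.mpr (Or.inr h))
        · intro h; exact h3 (List.infix_cons_iff.mpr (Or.inr h))

-- ===== VERDICT (by name: the statement is the Claim_ definition above) =====
theorem is_absolute_simply_route_spec : Claim_equal_is_absolute_simply_route := by
  intro route _
  unfold Spec_is_absolute_simply_route is_absolute_simply_route is_absolute_simply_route_alt
  by_cases h0 : route = ""
  · simp [h0]
  · have hne : route.toList ≠ [] := fun h => h0 (String.toList_eq_nil_iff.mp h)
    rcases List.exists_cons_of_ne_nil hne with ⟨c, rest, hcr⟩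
    have hdot : ("." : String).toList = ['.'] := rfl
    have hdd : (".." : String).toList = ['.', '.'] := rfl
    rw [if_neg h0, if_neg h0, pvSplitOn_eq, Bool.eq_iff_iff, pvKey]
    simp only [PySem.Str.startswith_eq, PySem.Str.endswith_eq, PySem.Str.isIn_eq, hdot, hdd,
      Bool.and_eq_true, Bool.not_eq_true', Bool.eq_false_iff, Ne,
      PySem.Chars.startswith_iff, PySem.Chars.endswith_iff, PySem.Chars.isIn_iff_infix]
    constructor
    · rintro ⟨h1, h2, h3⟩
      rcases h1 with h1 | ⟨d, r, hdr, hd⟩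
      · simp at h1
      · refine ⟨⟨?_, fun h => h2 h⟩, fun h => h3 h⟩
        intro hp
        rw [hdr] at hp
        exact hd ((List.cons_prefix_cons.mp hp).1.symm)
    · rintro ⟨⟨h1, h2⟩, h3⟩
      refine ⟨Or.inr ⟨c, rest, hcr, ?_⟩, h2, h3⟩
      intro hceq
      exact h1 (by rw [hcr, hceq]; exact List.cons_prefix_cons.mpr ⟨rfl, List.nil_prefix⟩)
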